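-- pv_equiv track=rewrite | github.com/gusevskiy/algorithms | algorithms_practikum/11_sprint/test.py | calculate
-- ===== SOURCE A (Python) =====
-- from typing import List, Tuple
--
-- def calculate(numbers: List[int], length: int) -> List[int]:
--     distance = []
--     zero_position = None
--     for i, value in enumerate(numbers):
--         if value == 0:
--             zero_position = i
--             distance.append(0)
--             continue
--         if zero_position is not None:
--             distance.append(i - zero_position)
--         else:
--             distance.append(length)
--     return distance
-- ===== SOURCE B (Python) =====
-- from typing import List
--
-- def _from_zero(rest: List[int]) -> List[int]:
--     # outputs for a zero element followed by `rest`
--     try: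
--         k = rest.index(0)
--     except ValueError:
--         return [0] + list(range(1, len(rest) + 1))
--     return [0] + list(range(1, k + 1)) + _from_zero(rest[k + 1:])
--
-- def calculate(numbers: List[int], length: int) -> List[int]:
--     try:
--         k = numbers.index(0)
--     except ValueError:
--         return [length] * len(numbers)
--     return [length] * k + _from_zero(numbers[k + 1:])
-- ===== Notes on version B (the rewrite author's own statement) =====
-- stated objective: alternative
-- what changed: Replaces A's element-by-element state machine (enumerate with a stored last-zero index) with a divide-and-conquer that locates each zero with list.index, emits whole chunks ([length]*k prefix and range(1,k+1) ramps), and recurses on the remainder after each zero.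
import Mathlib
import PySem

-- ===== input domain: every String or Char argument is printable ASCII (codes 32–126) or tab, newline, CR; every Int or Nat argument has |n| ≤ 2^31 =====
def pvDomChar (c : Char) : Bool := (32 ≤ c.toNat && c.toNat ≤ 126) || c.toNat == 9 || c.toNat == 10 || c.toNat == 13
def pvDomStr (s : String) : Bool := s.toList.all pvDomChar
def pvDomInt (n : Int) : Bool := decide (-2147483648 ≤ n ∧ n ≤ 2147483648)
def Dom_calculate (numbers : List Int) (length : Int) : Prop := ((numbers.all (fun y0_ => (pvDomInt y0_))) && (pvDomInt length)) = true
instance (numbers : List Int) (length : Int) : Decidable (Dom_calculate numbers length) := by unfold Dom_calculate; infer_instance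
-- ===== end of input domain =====

-- B replaces A's per-element state machine with chunk emission: find each zero with list.index,
-- emit [length]*k / range ramps as whole blocks, and recurse on the tail after the zero; same cost.

-- ===== PORT A =====
-- loop over enumerate: state = current index i and optional zero_position
def calculateLoop (length : Int) : List Int → Int → Option Int → List Int
  | [], _, _ => []
  | v :: vs, i, zp =>
    if v = 0 then 0 :: calculateLoop length vs (i + 1) (some i)
    else match zp with
      | some p => (i - p) :: calculateLoop length vs (i + 1) (some p)
      | none => length :: calculateLoop length vs (i + 1) none

def calculate (numbers : List Int) (length : Int) : List Int :=
  calculateLoop length numbers 0 none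

-- ===== PORT B =====
-- outputs for a zero element followed by `rest` (Source B's _from_zero)
def fromZero (rest : List Int) : List Int :=
  match h : PySem.List.index? rest 0 with
  | none => 0 :: PySem.List.pyRange 1 ((rest.length : Int) + 1) 1
  | some k =>
    (0 :: PySem.List.pyRange 1 ((k : Int) + 1) 1)
      ++ fromZero (PySem.List.slice rest (some ((k : Int) + 1)) none)
termination_by rest.length
decreasing_by
  have hk := PySem.List.getElem_of_index?_eq_some h
  obtain ⟨hlt, -, -⟩ := hk
  have : ((k : Int) + 1) = ((k + 1 : Nat) : Int) := by push_cast; ring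
  rw [this, PySem.List.slice_from_natCast]
  simp only [List.length_drop]
  omega

def calculate_alt (numbers : List Int) (length : Int) : List Int :=
  match PySem.List.index? numbers 0 with
  | none => List.replicate numbers.length length
  | some k =>
    List.replicate k length
      ++ fromZero (PySem.List.slice numbers (some ((k : Int) + 1)) none)

-- ===== PRECONDITION & SPEC =====
def Spec_calculate (numbers : List Int) (length : Int) (out : List Int) : Prop := out = calculate_alt numbers length
instance (numbers : List Int) (length : Int) (out : List Int) : Decidable (Spec_calculate numbers length out) := by unfold Spec_calculate; infer_instance

-- ===== CLAIM (what is proved, stated in full; the proofs are below) =====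
def Claim_equal_calculate : Prop := ∀ (numbers : List Int) (length : Int), Dom_calculate numbers length → Spec_calculate numbers length (calculate numbers length)

-- ===== LEMMAS AND PROOFS =====

-- Proof intermediary: a running-counter formulation of the same traversal.
def ctrLoop (length : Int) : List Int → Int → Bool → List Int
  | [], _, _ => []
  | v :: vs, dist, seen =>
    if v = 0 then 0 :: ctrLoop length vs 0 true
    else if seen then (dist + 1) :: ctrLoop length vs (dist + 1) true
    else length :: ctrLoop length vs dist false

-- A's loop from state (some p) equals the counter loop with dist = i - p - 1.
theorem loop_some (length : Int) (vs : List Int) : ∀ (i p : Int),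
    calculateLoop length vs i (some p) = ctrLoop length vs (i - p - 1) true := by
  induction vs with
  | nil => intro i p; rfl
  | cons v vs ih =>
    intro i p
    by_cases h : v = 0
    · simp only [calculateLoop, ctrLoop, if_pos h]
      rw [ih (i + 1) i]; norm_num
    · simp only [calculateLoop, ctrLoop, if_neg h]
      rw [ih (i + 1) p]
      have : i + 1 - p - 1 = i - p - 1 + 1 := by ring
      rw [this]; norm_num

theorem loop_none (length : Int) (vs : List Int) : ∀ (i d : Int),
    calculateLoop length vs i none = ctrLoop length vs d false := by
  induction vs with
  | nil => intro i d; rfl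
  | cons v vs ih =>
    intro i d
    by_cases h : v = 0
    · simp only [calculateLoop, ctrLoop, if_pos h]
      rw [loop_some length vs (i + 1) i]; norm_num
    · simp only [calculateLoop, ctrLoop, if_neg h]
      rw [ih (i + 1) d]; simp

-- zero-free list, flag false: the counter loop emits `length` for every element
theorem ctr_false_nomem (length : Int) (vs : List Int) (hv : (0 : Int) ∉ vs) :
    ∀ d, ctrLoop length vs d false = List.replicate vs.length length := by
  induction vs with
  | nil => intro d; rfl
  | cons v vs ih =>
    intro d
    have hvne : v ≠ 0 := fun h => hv (h ▸ List.mem_cons_self)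
    have hrest : (0 : Int) ∉ vs := fun h => hv (List.mem_cons_of_mem _ h)
    simp only [ctrLoop, if_neg hvne]
    rw [ih hrest d]
    rfl

-- zero-free list, flag true: the counter loop emits the ramp d+1, d+2, …
theorem ctr_true_nomem (length : Int) (vs : List Int) (hv : (0 : Int) ∉ vs) :
    ∀ d, ctrLoop length vs d true = PySem.List.pyRange (d + 1) (d + 1 + vs.length) 1 := by
  induction vs with
  | nil =>
    intro d
    simp [ctrLoop, PySem.List.pyRange_one_eq_nil]
  | cons v vs ih =>
    intro d
    have hvne : v ≠ 0 := fun h => hv (h ▸ List.mem_cons_self)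
    have hrest : (0 : Int) ∉ vs := fun h => hv (List.mem_cons_of_mem _ h)
    simp only [ctrLoop, if_neg hvne]
    rw [ih hrest (d + 1)]
    simp only [List.length_cons]
    push_cast
    conv_rhs => rw [PySem.List.pyRange_one_cons (by omega)]
    have h2 : d + 1 + (↑vs.length + 1) = d + 1 + 1 + (vs.length : Int) := by ring
    rw [h2]

-- splitting a zero-free prefix off, flag true
theorem ctr_true_append (length : Int) (pre : List Int) (hv : (0 : Int) ∉ pre) :
    ∀ (rest : List Int) (d : Int),
    ctrLoop length (pre ++ rest) d true
      = PySem.List.pyRange (d + 1) (d + 1 + pre.length) 1 ++ ctrLoop length rest (d + pre.length) true := by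
  induction pre with
  | nil =>
    intro rest d
    simp [PySem.List.pyRange_one_eq_nil]
  | cons v pre ih =>
    intro rest d
    have hvne : v ≠ 0 := fun h => hv (h ▸ List.mem_cons_self)
    have hrest : (0 : Int) ∉ pre := fun h => hv (List.mem_cons_of_mem _ h)
    simp only [List.cons_append, ctrLoop, if_neg hvne]
    rw [ih hrest rest (d + 1)]
    simp only [List.length_cons]
    push_cast
    conv_rhs => rw [PySem.List.pyRange_one_cons (by omega)]
    simp only [List.cons_append]
    have h2 : d + 1 + ((pre.length : Int) + 1) = d + 1 + 1 + (pre.length : Int) := by ring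
    have h3 : d + ((pre.length : Int) + 1) = d + 1 + (pre.length : Int) := by ring
    rw [h2, h3]

-- splitting a zero-free prefix off, flag false
theorem ctr_false_append (length : Int) (pre : List Int) (hv : (0 : Int) ∉ pre) :
    ∀ (rest : List Int) (d : Int),
    ctrLoop length (pre ++ rest) d false
      = List.replicate pre.length length ++ ctrLoop length rest d false := by
  induction pre with
  | nil => intro rest d; simp
  | cons v pre ih =>
    intro rest d
    have hvne : v ≠ 0 := fun h => hv (h ▸ List.mem_cons_self)
    have hrest : (0 : Int) ∉ pre := fun h => hv (List.mem_cons_of_mem _ h)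
    simp only [List.cons_append, ctrLoop, if_neg hvne]
    rw [ih hrest rest d]
    rfl

theorem slice_drop (xs : List Int) (k : Nat) :
    PySem.List.slice xs (some ((k : Int) + 1)) none = xs.drop (k + 1) := by
  have : ((k : Int) + 1) = ((k + 1 : Nat) : Int) := by push_cast; ring
  rw [this, PySem.List.slice_from_natCast]

-- fromZero computes the counter loop for a list following a zero
theorem fromZero_eq_ctr (length : Int) : ∀ (xs : List Int),
    fromZero xs = 0 :: ctrLoop length xs 0 true := by
  intro xs
  induction hn : xs.length using Nat.strong_induction_on generalizing xs with
  | _ n ih =>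
  cases h : PySem.List.index? xs 0 with
  | none =>
    have hv : (0 : Int) ∉ xs := (PySem.List.index?_eq_none_iff xs 0).mp h
    rw [fromZero, h, ctr_true_nomem length xs hv 0]
    have h2 : (0 : Int) + 1 + (xs.length : Int) = (xs.length : Int) + 1 := by ring
    rw [h2]
    norm_num
  | some k =>
    obtain ⟨pre, suf, hxs, hlen, hvp⟩ := (PySem.List.index?_eq_some_iff xs 0 k).mp h
    rw [fromZero, h]
    dsimp only
    have hdrop : PySem.List.slice xs (some ((k : Int) + 1)) none = suf := by
      rw [slice_drop, hxs, ← hlen]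
      simp
    rw [hdrop]
    have hsuf : suf.length < n := by
      subst hn; rw [hxs]; simp; omega
    rw [ih suf.length hsuf suf rfl]
    conv_rhs => rw [hxs, ctr_true_append length pre hvp (0 :: suf) 0]
    simp only [ctrLoop, ite_true]
    rw [← hlen]
    simp only [List.cons_append]
    have h2 : (0 : Int) + 1 + (pre.length : Int) = (pre.length : Int) + 1 := by ring
    have h3 : (0 : Int) + 1 = 1 := by ring
    rw [h2, h3]

theorem alt_eq_ctr (numbers : List Int) (length : Int) :
    calculate_alt numbers length = ctrLoop length numbers 0 false := by
  unfold calculate_alt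
  cases h : PySem.List.index? numbers 0 with
  | none =>
    have hv : (0 : Int) ∉ numbers := (PySem.List.index?_eq_none_iff numbers 0).mp h
    rw [ctr_false_nomem length numbers hv 0]
  | some k =>
    obtain ⟨pre, suf, hxs, hlen, hvp⟩ := (PySem.List.index?_eq_some_iff numbers 0 k).mp h
    have hdrop : PySem.List.slice numbers (some ((k : Int) + 1)) none = suf := by
      rw [slice_drop, hxs, ← hlen]
      simp
    dsimp only
    rw [hdrop, fromZero_eq_ctr length suf]
    conv_rhs => rw [hxs, ctr_false_append length pre hvp (0 :: suf) 0]
    simp only [ctrLoop, ite_true, hlen]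

-- ===== VERDICT (by name: the statement is the Claim_ definition above) =====
theorem calculate_spec : Claim_equal_calculate := by
  intro numbers length _
  unfold Spec_calculate calculate
  rw [alt_eq_ctr, loop_none length numbers 0 0]
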